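-- pv_equiv track=rewrite | github.com/shuningzhou/zoho | final.py | calculate_fret_ranges
-- ===== SOURCE A (Python) =====
-- def calculate_fret_ranges(root_fret):
--     def wrap_fret_range(range_start, range_end):
--         """Adjusts fret range to fall between 2 and 22."""
--         while range_start < 2:
--             range_start += 12
--             range_end += 12
--         while range_end > 22:
--             range_start -= 12
--             range_end -= 12
--         return range_start, range_end
--
--     # Original ranges before wrapping
--     raw_ranges = {
--         1: (root_fret - 3, root_fret),
--         2: (root_fret - 1, root_fret + 2),
--         3: (root_fret + 1, root_fret + 5),
--         4: (root_fret + 4, root_fret + 7),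
--         5: (root_fret - 6, root_fret - 3)
--     }
--
--     # Wrap each range to ensure it stays within 2-22
--     wrapped_ranges = {pos: wrap_fret_range(*rng) for pos, rng in raw_ranges.items()}
--     return wrapped_ranges
-- ===== SOURCE B (Python) =====
-- def calculate_fret_ranges(root_fret):
--     def wrap(s, e):
--         # raise in one step: smallest multiple of 12 making s >= 2
--         if s < 2:
--             up = 2 + (s - 2) % 12 - s
--             s += up
--             e += up
--         # lower in one step: smallest multiple of 12 making e <= 22
--         if e > 22:
--             down = e - (22 - (22 - e) % 12)
--             s -= down
--             e -= down
--         return s, e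
--
--     offsets = {1: (-3, 0), 2: (-1, 2), 3: (1, 5), 4: (4, 7), 5: (-6, -3)}
--     return {pos: wrap(root_fret + lo, root_fret + hi) for pos, (lo, hi) in offsets.items()}
-- ===== Notes on version B (the rewrite author's own statement) =====
-- stated objective: faster
-- what changed: Replaced the two while-loops that shift each fret range one octave per iteration with closed-form modular arithmetic computing each total shift in a single step.
import Mathlib
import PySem

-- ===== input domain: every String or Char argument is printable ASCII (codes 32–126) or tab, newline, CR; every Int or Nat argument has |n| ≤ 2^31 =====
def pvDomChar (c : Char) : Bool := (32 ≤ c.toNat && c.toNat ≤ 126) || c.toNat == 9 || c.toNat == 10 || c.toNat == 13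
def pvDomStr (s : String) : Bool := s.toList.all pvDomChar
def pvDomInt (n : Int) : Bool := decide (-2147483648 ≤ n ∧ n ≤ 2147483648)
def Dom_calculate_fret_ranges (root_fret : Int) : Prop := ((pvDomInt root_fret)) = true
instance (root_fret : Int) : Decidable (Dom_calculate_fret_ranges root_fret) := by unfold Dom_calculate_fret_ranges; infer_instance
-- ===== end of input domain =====

-- B replaces A's step-by-12 while-loops with one-step closed-form modular arithmetic (faster).

-- ===== PORT A =====
-- `while range_start < 2: range_start += 12; range_end += 12`
def pvWrapUp (range_start range_end : Int) : Int × Int :=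
  if range_start < 2 then pvWrapUp (range_start + 12) (range_end + 12)
  else (range_start, range_end)
  termination_by (2 - range_start).toNat
  decreasing_by omega

-- `while range_end > 22: range_start -= 12; range_end -= 12`
def pvWrapDown (range_start range_end : Int) : Int × Int :=
  if range_end > 22 then pvWrapDown (range_start - 12) (range_end - 12)
  else (range_start, range_end)
  termination_by (range_end - 22).toNat
  decreasing_by omega

def pvWrapFretRange (range_start range_end : Int) : Int × Int :=
  let p := pvWrapUp range_start range_end
  pvWrapDown p.1 p.2

def calculate_fret_ranges (root_fret : Int) : List (Int × Int × Int) :=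
  -- dict {1: …, 2: …, 3: …, 4: …, 5: …} in insertion order
  [(1, pvWrapFretRange (root_fret - 3) root_fret),
   (2, pvWrapFretRange (root_fret - 1) (root_fret + 2)),
   (3, pvWrapFretRange (root_fret + 1) (root_fret + 5)),
   (4, pvWrapFretRange (root_fret + 4) (root_fret + 7)),
   (5, pvWrapFretRange (root_fret - 6) (root_fret - 3))]

-- ===== PORT B =====
def pvWrapAlt (s e : Int) : Int × Int :=
  let p :=
    if s < 2 then
      let up := 2 + PySem.Int.mod (s - 2) 12 - s
      (s + up, e + up)
    else (s, e)
  if p.2 > 22 then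
    let down := p.2 - (22 - PySem.Int.mod (22 - p.2) 12)
    (p.1 - down, p.2 - down)
  else p

def calculate_fret_ranges_alt (root_fret : Int) : List (Int × Int × Int) :=
  [(1, (-3, 0)), (2, (-1, 2)), (3, (1, 5)), (4, (4, 7)), (5, (-6, -3))].map
    (fun pr => (pr.1, pvWrapAlt (root_fret + pr.2.1) (root_fret + pr.2.2)))

-- ===== PRECONDITION & SPEC =====
def Spec_calculate_fret_ranges (root_fret : Int) (out : List (Int × Int × Int)) : Prop := out = calculate_fret_ranges_alt root_fret
instance (root_fret : Int) (out : List (Int × Int × Int)) : Decidable (Spec_calculate_fret_ranges root_fret out) := by unfold Spec_calculate_fret_ranges; infer_instance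

-- ===== CLAIM (what is proved, stated in full; the proofs are below) =====
def Claim_equal_calculate_fret_ranges : Prop := ∀ (root_fret : Int), Dom_calculate_fret_ranges root_fret → Spec_calculate_fret_ranges root_fret (calculate_fret_ranges root_fret)

-- ===== LEMMAS AND PROOFS =====

theorem pvWrapUp_eq (s e : Int) :
    pvWrapUp s e = if s < 2 then (2 + (s - 2) % 12, e + (2 + (s - 2) % 12 - s)) else (s, e) := by
  rw [pvWrapUp]
  by_cases h : s < 2
  · simp only [h, if_true]
    rw [pvWrapUp_eq (s + 12) (e + 12)]
    by_cases h2 : s + 12 < 2 <;> simp only [h2, if_true, if_false, Prod.mk.injEq] <;>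
      constructor <;> omega
  · simp [h]
  termination_by (2 - s).toNat
  decreasing_by omega

theorem pvWrapDown_eq (s e : Int) :
    pvWrapDown s e = if e > 22 then (s - (e - (22 - (22 - e) % 12)), 22 - (22 - e) % 12) else (s, e) := by
  rw [pvWrapDown]
  by_cases h : e > 22
  · simp only [h, if_true]
    rw [pvWrapDown_eq (s - 12) (e - 12)]
    by_cases h2 : e - 12 > 22 <;> simp only [h2, if_true, if_false, Prod.mk.injEq] <;>
      constructor <;> omega
  · simp [h]
  termination_by (e - 22).toNat
  decreasing_by omega

theorem pvWrap_eq (s e : Int) : pvWrapFretRange s e = pvWrapAlt s e := by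
  have hm : ∀ a : Int, PySem.Int.mod a 12 = a % 12 :=
    fun a => PySem.Int.mod_eq_emod_of_pos (by norm_num)
  unfold pvWrapFretRange pvWrapAlt
  rw [pvWrapUp_eq, pvWrapDown_eq]
  simp only [hm]
  by_cases h : s < 2 <;> simp only [h, if_true, if_false]
  · by_cases h2 : e + (2 + (s - 2) % 12 - s) > 22 <;>
      simp only [h2, if_true, if_false, Prod.mk.injEq]
    · constructor <;> omega
    · exact ⟨by omega, trivial⟩
  · by_cases h2 : e > 22
    · simp only [h2, if_true, Prod.mk.injEq]
      exact ⟨trivial, by omega⟩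
    · simp only [h2, if_false]

-- ===== VERDICT (by name: the statement is the Claim_ definition above) =====
theorem calculate_fret_ranges_spec : Claim_equal_calculate_fret_ranges := by
  intro root_fret _
  unfold Spec_calculate_fret_ranges calculate_fret_ranges calculate_fret_ranges_alt
  simp [List.map, pvWrap_eq, sub_eq_add_neg]
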